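-- pv_equiv track=rewrite | github.com/juanmagnaprocessos-web/validador-oc | backend/scripts/descobrir_ids_pipefy.py | _buscar_fase
-- ===== SOURCE A (Python) =====
-- import unicodedata
--
-- def _norm(s: str) -> str:
--     """Normaliza string para comparação tolerante (sem acentos, lowercase)."""
--     if not s:
--         return ""
--     s = unicodedata.normalize("NFKD", s)
--     s = "".join(c for c in s if not unicodedata.combining(c))
--     return s.lower().strip()
--
-- def _buscar_fase(phases: list[dict], nome_alvo: str) -> dict | None:
--     alvo = _norm(nome_alvo)
--     for p in phases:
--         if _norm(p["name"]) == alvo: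
--             return p
--     # fallback: contains
--     for p in phases:
--         if alvo in _norm(p["name"]):
--             return p
--     return None
-- ===== SOURCE B (Python) =====
-- import unicodedata
--
-- def _norm(s: str) -> str:
--     if not s:
--         return ""
--     s = unicodedata.normalize("NFKD", s)
--     s = "".join(c for c in s if not unicodedata.combining(c))
--     return s.lower().strip()
--
-- def _buscar_fase(phases: list[dict], nome_alvo: str) -> dict | None:
--     # single pass: exact match returns immediately; first contains-match is
--     # remembered and returned only after the whole list has been scanned
--     alvo = _norm(nome_alvo)
--     fallback = None
--     for p in phases:
--         n = _norm(p["name"])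
--         if n == alvo:
--             return p
--         if fallback is None and alvo in n:
--             fallback = p
--     return fallback
-- ===== Notes on version B (the rewrite author's own statement) =====
-- stated objective: alternative
-- what changed: Replaced A's two passes (exact scan, then contains scan) by a single loop that returns on an exact match and remembers the first contains-match as a fallback, normalizing each phase name once instead of twice.
-- outside the precondition, e.g. on _buscar_fase([{'name': 'x'}, {}], 'x'): A returns {'name': 'x'}, B returns {'name': 'x'}
import Mathlib
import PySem

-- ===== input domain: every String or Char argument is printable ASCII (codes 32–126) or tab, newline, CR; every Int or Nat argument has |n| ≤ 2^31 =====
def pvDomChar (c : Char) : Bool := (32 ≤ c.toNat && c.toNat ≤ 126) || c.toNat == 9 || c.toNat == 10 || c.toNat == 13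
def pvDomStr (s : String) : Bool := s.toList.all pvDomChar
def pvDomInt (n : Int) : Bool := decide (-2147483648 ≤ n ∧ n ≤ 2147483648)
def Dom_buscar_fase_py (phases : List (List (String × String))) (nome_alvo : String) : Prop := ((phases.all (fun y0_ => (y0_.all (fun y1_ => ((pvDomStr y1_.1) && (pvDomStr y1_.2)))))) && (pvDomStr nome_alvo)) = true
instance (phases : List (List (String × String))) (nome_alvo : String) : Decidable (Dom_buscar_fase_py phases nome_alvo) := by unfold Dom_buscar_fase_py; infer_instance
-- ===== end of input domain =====

-- B replaces A's two passes (exact scan, then contains scan) by one pass that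
-- remembers the first contains-match as a fallback, normalizing each name once (objective: alternative).

-- shared helper _norm: on the ASCII domain NFKD normalization and removal of
-- combining characters are the identity, so _norm(s) = s.lower().strip(); exact there.
def pyNorm (s : String) : String :=
  if s = "" then "" else PySem.Str.strip (PySem.Str.lower s)

-- ===== PORT A =====
-- first loop of A: exact normalized match
def aLoop1 (alvo : String) : List (List (String × String)) → Option (List (String × String))
  | [] => none
  | p :: ps =>
    if pyNorm (PySem.Dict.getD (PySem.Dict.mk p) "name" "") = alvo then some p else aLoop1 alvo ps

-- second loop of A: contains fallback
def aLoop2 (alvo : String) : List (List (String × String)) → Option (List (String × String))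
  | [] => none
  | p :: ps =>
    if PySem.Str.isIn alvo (pyNorm (PySem.Dict.getD (PySem.Dict.mk p) "name" "")) then some p else aLoop2 alvo ps

def buscar_fase_py (phases : List (List (String × String))) (nome_alvo : String) : Option (List (String × String)) :=
  let alvo := pyNorm nome_alvo
  match aLoop1 alvo phases with
  | some p => some p
  | none => aLoop2 alvo phases

-- ===== PORT B =====
-- B's single loop carrying the fallback accumulator
def bLoop (alvo : String) : List (List (String × String)) → Option (List (String × String)) → Option (List (String × String))
  | [], fallback => fallback
  | p :: ps, fallback =>
    let n := pyNorm (PySem.Dict.getD (PySem.Dict.mk p) "name" "")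
    if n = alvo then some p
    else if fallback.isNone && PySem.Str.isIn alvo n then bLoop alvo ps (some p)
    else bLoop alvo ps fallback

def buscar_fase_py_alt (phases : List (List (String × String))) (nome_alvo : String) : Option (List (String × String)) :=
  bLoop (pyNorm nome_alvo) phases none

-- ===== PRECONDITION & SPEC =====
-- Pre_ excludes inputs where some phase dict lacks the key "name": there A raises
-- KeyError (except when an earlier phase already matched exactly, in which case B
-- returns the same phase anyway).
def Pre_buscar_fase_py (phases : List (List (String × String))) (nome_alvo : String) : Prop :=
  ∀ p ∈ phases, PySem.Dict.contains (PySem.Dict.mk p) "name" = true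
instance (phases : List (List (String × String))) (nome_alvo : String) : Decidable (Pre_buscar_fase_py phases nome_alvo) := by unfold Pre_buscar_fase_py; infer_instance

def pvWitness_buscar_fase_py : (List (List (String × String))) × String :=
  ([[("name", "Triagem")], [("name", " Analise OC ")]], "analise oc")

def Spec_buscar_fase_py (phases : List (List (String × String))) (nome_alvo : String) (out : Option (List (String × String))) : Prop := out = buscar_fase_py_alt phases nome_alvo
instance (phases : List (List (String × String))) (nome_alvo : String) (out : Option (List (String × String))) : Decidable (Spec_buscar_fase_py phases nome_alvo out) := by unfold Spec_buscar_fase_py; infer_instance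

-- ===== CLAIM (what is proved, stated in full; the proofs are below) =====
def Claim_equal_buscar_fase_py : Prop := ∀ (phases : List (List (String × String))) (nome_alvo : String), Dom_buscar_fase_py phases nome_alvo → Pre_buscar_fase_py phases nome_alvo → Spec_buscar_fase_py phases nome_alvo (buscar_fase_py phases nome_alvo)

-- ===== LEMMAS AND PROOFS =====

-- the one-pass loop equals: exact scan first, else the carried fallback, else the contains scan
theorem bLoop_eq (alvo : String) (ps : List (List (String × String))) :
    ∀ fallback, bLoop alvo ps fallback =
      match aLoop1 alvo ps with
      | some q => some q
      | none => match fallback with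
                | some f => some f
                | none => aLoop2 alvo ps := by
  induction ps with
  | nil => intro fallback; cases fallback <;> simp [bLoop, aLoop1, aLoop2]
  | cons p ps ih =>
    intro fallback
    simp only [bLoop, aLoop1, aLoop2]
    by_cases hx : pyNorm (PySem.Dict.getD (PySem.Dict.mk p) "name" "") = alvo
    · simp [hx]
    · simp only [hx, if_false]
      cases fallback with
      | some f => simp [ih]
      | none =>
        by_cases hc : PySem.Str.isIn alvo (pyNorm (PySem.Dict.getD (PySem.Dict.mk p) "name" "")) = true
        · simp only [PySem.Str.isIn_eq] at hc
          simp [hc, ih]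
        · simp only [Bool.not_eq_true, PySem.Str.isIn_eq] at hc
          simp [hc, ih]

theorem pvWitness_ok :
    Dom_buscar_fase_py pvWitness_buscar_fase_py.1 pvWitness_buscar_fase_py.2 ∧
    Pre_buscar_fase_py pvWitness_buscar_fase_py.1 pvWitness_buscar_fase_py.2 := by
  constructor <;> decide

-- ===== VERDICT (by name: the statement is the Claim_ definition above) =====
theorem buscar_fase_py_spec : Claim_equal_buscar_fase_py := by
  intro phases nome_alvo _ _
  unfold Spec_buscar_fase_py buscar_fase_py buscar_fase_py_alt
  rw [bLoop_eq]
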